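-- pv_equiv track=rewrite | github.com/kmoon0001/spec-kit-analyzer | security_log_review.py | _assess_compliance_status
-- ===== SOURCE A (Python) =====
-- from typing import Dict, List, Optional, Any, Tuple
--
-- def _assess_compliance_status(events: List[Dict[str, Any]]) -> Dict[str, bool]:
--     """Assess compliance status based on security events."""
--     compliance_checks = {
--         "no_critical_incidents": not any(
--             e.get("event_type") in ["malware_detected", "data_breach"] for e in events
--         ),
--         "authentication_monitoring": any(
--             e.get("event_type") == "authentication_failure" for e in events
--         ),
--         "access_control_monitoring": any(
--             e.get("event_type") in ["privilege_escalation", "data_access"] for e in events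
--         ),
--         "network_security_monitoring": any(
--             e.get("event_type") == "network_anomaly" for e in events
--         )
--     }
--
--     return compliance_checks
-- ===== SOURCE B (Python) =====
-- from typing import Dict, List, Any
--
-- def _assess_compliance_status(events: List[Dict[str, Any]]) -> Dict[str, bool]:
--     """Assess compliance status based on security events (single pass)."""
--     no_critical = True
--     auth = False
--     access = False
--     network = False
--     for e in events:
--         t = e.get("event_type")
--         if t == "malware_detected" or t == "data_breach":
--             no_critical = False
--         elif t == "authentication_failure":
--             auth = True
--         elif t == "privilege_escalation" or t == "data_access":
--             access = True
--         elif t == "network_anomaly":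
--             network = True
--     return {
--         "no_critical_incidents": no_critical,
--         "authentication_monitoring": auth,
--         "access_control_monitoring": access,
--         "network_security_monitoring": network,
--     }
-- ===== Notes on version B (the rewrite author's own statement) =====
-- stated objective: simpler
-- what changed: Replaces four separate any()-scans over the event list with one loop maintaining four accumulated flags.
import Mathlib
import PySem

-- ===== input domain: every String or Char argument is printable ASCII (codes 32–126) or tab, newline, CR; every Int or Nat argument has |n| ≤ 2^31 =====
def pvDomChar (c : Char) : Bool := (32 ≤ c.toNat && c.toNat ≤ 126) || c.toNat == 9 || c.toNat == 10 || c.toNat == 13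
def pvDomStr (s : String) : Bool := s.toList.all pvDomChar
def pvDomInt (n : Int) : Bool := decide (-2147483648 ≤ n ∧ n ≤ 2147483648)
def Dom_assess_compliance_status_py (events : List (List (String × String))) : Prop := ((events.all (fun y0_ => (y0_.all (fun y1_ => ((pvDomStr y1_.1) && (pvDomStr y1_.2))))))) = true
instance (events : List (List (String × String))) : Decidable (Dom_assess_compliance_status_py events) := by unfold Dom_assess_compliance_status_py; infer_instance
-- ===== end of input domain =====

-- B replaces A's four short-circuiting any()-scans over the event list by one pass
-- maintaining four accumulated flags (objective: simpler, single traversal).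

-- ===== PORT A =====
-- A: four independent any(...) scans, one per compliance key.
def assess_compliance_status_py (events : List (List (String × String))) : List (String × Bool) :=
  [("no_critical_incidents",
      !(events.any (fun e => [some "malware_detected", some "data_breach"].contains ((PySem.Dict.mk e).get? "event_type")))),
   ("authentication_monitoring",
      events.any (fun e => (PySem.Dict.mk e).get? "event_type" == some "authentication_failure")),
   ("access_control_monitoring",
      events.any (fun e => [some "privilege_escalation", some "data_access"].contains ((PySem.Dict.mk e).get? "event_type"))),
   ("network_security_monitoring",
      events.any (fun e => (PySem.Dict.mk e).get? "event_type" == some "network_anomaly"))]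

-- ===== PORT B =====
-- B: one fold over events updating four flags (no_critical, auth, access, network).
def pvAltStep (s : Bool × Bool × Bool × Bool) (e : List (String × String)) : Bool × Bool × Bool × Bool :=
  let t := (PySem.Dict.mk e).get? "event_type"
  if t == some "malware_detected" || t == some "data_breach" then (false, s.2.1, s.2.2.1, s.2.2.2)
  else if t == some "authentication_failure" then (s.1, true, s.2.2.1, s.2.2.2)
  else if t == some "privilege_escalation" || t == some "data_access" then (s.1, s.2.1, true, s.2.2.2)
  else if t == some "network_anomaly" then (s.1, s.2.1, s.2.2.1, true)
  else s

def assess_compliance_status_py_alt (events : List (List (String × String))) : List (String × Bool) :=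
  let s := events.foldl pvAltStep (true, false, false, false)
  [("no_critical_incidents", s.1),
   ("authentication_monitoring", s.2.1),
   ("access_control_monitoring", s.2.2.1),
   ("network_security_monitoring", s.2.2.2)]

-- ===== PRECONDITION & SPEC =====
def Spec_assess_compliance_status_py (events : List (List (String × String))) (out : List (String × Bool)) : Prop := out = assess_compliance_status_py_alt events
instance (events : List (List (String × String))) (out : List (String × Bool)) : Decidable (Spec_assess_compliance_status_py events out) := by unfold Spec_assess_compliance_status_py; infer_instance

-- ===== CLAIM (what is proved, stated in full; the proofs are below) =====
def Claim_equal_assess_compliance_status_py : Prop := ∀ (events : List (List (String × String))), Dom_assess_compliance_status_py events → Spec_assess_compliance_status_py events (assess_compliance_status_py events)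

-- ===== LEMMAS AND PROOFS =====

theorem pvAltStep_eq (s : Bool × Bool × Bool × Bool) (e : List (String × String)) :
    pvAltStep s e =
      ( s.1 && !([some "malware_detected", some "data_breach"].contains ((PySem.Dict.mk e).get? "event_type")),
        s.2.1 || ((PySem.Dict.mk e).get? "event_type" == some "authentication_failure"),
        s.2.2.1 || ([some "privilege_escalation", some "data_access"].contains ((PySem.Dict.mk e).get? "event_type")),
        s.2.2.2 || ((PySem.Dict.mk e).get? "event_type" == some "network_anomaly") ) := by
  unfold pvAltStep
  rcases (PySem.Dict.mk e).get? "event_type" with _ | t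
  · simp
  · dsimp only
    split_ifs with h1 h2 h3 h4
    · simp only [Bool.or_eq_true, beq_iff_eq, Option.some.injEq] at h1
      rcases h1 with h | h <;> subst h <;> simp
    · simp only [beq_iff_eq, Option.some.injEq] at h2; subst h2; simp
    · simp only [Bool.or_eq_true, beq_iff_eq, Option.some.injEq] at h3
      rcases h3 with h | h <;> subst h <;> simp
    · simp only [beq_iff_eq, Option.some.injEq] at h4; subst h4; simp
    · simp only [Bool.or_eq_true, beq_iff_eq, Option.some.injEq, not_or] at h1 h2 h3 h4
      have a2 : (t == "authentication_failure") = false := beq_eq_false_iff_ne.mpr h2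
      have a4 : (t == "network_anomaly") = false := beq_eq_false_iff_ne.mpr h4
      simp [h1.1, h1.2, h3.1, h3.2, a2, a4]

theorem pvFold_eq (events : List (List (String × String))) (s : Bool × Bool × Bool × Bool) :
    events.foldl pvAltStep s =
      ( s.1 && !(events.any (fun e => [some "malware_detected", some "data_breach"].contains ((PySem.Dict.mk e).get? "event_type"))),
        s.2.1 || events.any (fun e => (PySem.Dict.mk e).get? "event_type" == some "authentication_failure"),
        s.2.2.1 || events.any (fun e => [some "privilege_escalation", some "data_access"].contains ((PySem.Dict.mk e).get? "event_type")),
        s.2.2.2 || events.any (fun e => (PySem.Dict.mk e).get? "event_type" == some "network_anomaly") ) := by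
  induction events generalizing s with
  | nil => simp
  | cons e rest ih =>
    simp only [List.foldl_cons, List.any_cons, pvAltStep_eq, ih]
    simp [Bool.and_assoc, Bool.or_assoc]

-- ===== VERDICT (by name: the statement is the Claim_ definition above) =====
theorem assess_compliance_status_py_spec : Claim_equal_assess_compliance_status_py := by
  intro events _
  unfold Spec_assess_compliance_status_py assess_compliance_status_py assess_compliance_status_py_alt
  simp [pvFold_eq]
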